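-- pv_equiv track=rewrite | github.com/khanasif1/twooter | _src/_bot/scraping/victor_scraper_simple.py | _is_press_release
-- ===== SOURCE A (Python) =====
-- from typing import Dict, List, Optional, Set
--
-- def _is_press_release(article_data: Dict) -> bool:
--     """Determine if an article is a press release."""
--     text_to_check = (
--         article_data.get('title', '') + ' ' +
--         article_data.get('content', '') + ' ' +
--         article_data.get('summary', '')
--     ).lower()
--
--     press_release_indicators = [
--         'press release', 'announces', 'statement', 'official', 'campaign',
--         'for immediate release', 'media contact'
--     ]
--
--     return any(indicator in text_to_check for indicator in press_release_indicators)
-- ===== SOURCE B (Python) =====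
-- def _is_press_release(article_data) -> bool:
--     """Group the indicator phrases by first character once, then make a single
--     left-to-right pass over the text, testing only the indicators whose first
--     character matches the current character."""
--     text = ' '.join([article_data.get(k, '')
--                      for k in ('title', 'content', 'summary')]).lower()
--
--     indicators = [
--         'press release', 'announces', 'statement', 'official', 'campaign',
--         'for immediate release', 'media contact'
--     ]
--
--     by_first = {}
--     for ind in indicators:
--         by_first[ind[0]] = by_first.get(ind[0], []) + [ind]
--
--     for i, ch in enumerate(text):
--         for ind in by_first.get(ch, []):
--             if text.startswith(ind, i):
--                 return True
--     return False
-- ===== Notes on version B (the rewrite author's own statement) =====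
-- stated objective: alternative
-- what changed: Instead of seven independent full-text 'in' scans, B builds a first-character index (dict of indicator phrases keyed by their first letter) once and makes a single left-to-right pass over the text, testing at each position only the indicators whose first character matches the current character.
import Mathlib
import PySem

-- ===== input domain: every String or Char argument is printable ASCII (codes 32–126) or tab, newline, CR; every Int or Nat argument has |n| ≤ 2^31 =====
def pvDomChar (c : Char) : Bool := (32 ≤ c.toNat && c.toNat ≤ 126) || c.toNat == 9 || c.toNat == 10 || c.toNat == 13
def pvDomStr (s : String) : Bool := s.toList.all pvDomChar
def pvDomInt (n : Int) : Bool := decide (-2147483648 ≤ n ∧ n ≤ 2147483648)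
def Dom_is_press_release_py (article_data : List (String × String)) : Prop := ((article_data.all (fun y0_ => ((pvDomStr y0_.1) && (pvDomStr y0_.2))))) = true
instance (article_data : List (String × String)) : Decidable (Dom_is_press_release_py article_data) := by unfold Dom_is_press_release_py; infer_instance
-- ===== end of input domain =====

-- B replaces A's seven independent full-text substring scans by a dict index of the
-- indicator phrases keyed by their first character, built once, plus one left-to-right
-- pass over the text that tests only the phrases whose first character matches (alternative).

-- ===== PORT A =====
def is_press_release_py (article_data : List (String × String)) : Bool :=
  let text_to_check : List Char :=
    PySem.Chars.lower
      ((PySem.Dict.getD (PySem.Dict.mk article_data) "title" "").toList ++ [' '] ++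
       (PySem.Dict.getD (PySem.Dict.mk article_data) "content" "").toList ++ [' '] ++
       (PySem.Dict.getD (PySem.Dict.mk article_data) "summary" "").toList)
  let press_release_indicators : List (List Char) :=
    ["press release".toList, "announces".toList, "statement".toList, "official".toList,
     "campaign".toList, "for immediate release".toList, "media contact".toList]
  press_release_indicators.any (fun indicator => PySem.Chars.isIn indicator text_to_check)

-- ===== PORT B =====
-- B's indicator list (same literal phrases)
def pvAltInds : List (List Char) :=
  ["press release".toList, "announces".toList, "statement".toList, "official".toList,
   "campaign".toList, "for immediate release".toList, "media contact".toList]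

-- "for ind in indicators: by_first[ind[0]] = by_first.get(ind[0], []) + [ind]"
-- (ind[0] is ind.headD ' '; exact here since every indicator literal is nonempty)
def pvAltByFirst : PySem.Dict Char (List (List Char)) :=
  (pvAltInds.map (fun ind => (ind.headD ' ', ind))).foldl
    (fun d p => d.modify p.1 [] (· ++ [p.2])) PySem.Dict.empty

-- "for i, ch in enumerate(text): for ind in by_first.get(ch, []): if text.startswith(ind, i): return True"
-- (text.startswith(ind, i) is startswith on the i-th suffix, so the loop is a recursion on suffixes)
def pvAltScan : List Char → Bool
  | [] => false
  | c :: rest =>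
      if (PySem.Dict.getD pvAltByFirst c []).any
           (fun ind => PySem.Chars.startswith (c :: rest) ind) then true
      else pvAltScan rest

def is_press_release_py_alt (article_data : List (String × String)) : Bool :=
  pvAltScan
    (PySem.Chars.lower
      (PySem.Chars.join [' ']
        [(PySem.Dict.getD (PySem.Dict.mk article_data) "title" "").toList,
         (PySem.Dict.getD (PySem.Dict.mk article_data) "content" "").toList,
         (PySem.Dict.getD (PySem.Dict.mk article_data) "summary" "").toList]))

-- ===== PRECONDITION & SPEC =====
def Spec_is_press_release_py (article_data : List (String × String)) (out : Bool) : Prop := out = is_press_release_py_alt article_data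
instance (article_data : List (String × String)) (out : Bool) : Decidable (Spec_is_press_release_py article_data out) := by unfold Spec_is_press_release_py; infer_instance

-- ===== CLAIM =====
def Claim_equal_is_press_release_py : Prop := ∀ (article_data : List (String × String)), Dom_is_press_release_py article_data → Spec_is_press_release_py article_data (is_press_release_py article_data)

-- ===== LEMMAS AND PROOFS =====

-- the first-character index looks up exactly the indicators whose first character is c
theorem pvAltByFirst_getD (c : Char) :
    PySem.Dict.getD pvAltByFirst c [] =
      (pvAltInds.filter (fun ind => ind.headD ' ' == c)) := by
  unfold pvAltByFirst
  rw [PySem.Dict.getD_foldl_modify_append]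
  simp [List.filter_map, Function.comp_def]

-- ' '.join([a,b,c]) is the same concatenation A writes out by hand
theorem pvJoin3 (a b c : List Char) :
    PySem.Chars.join [' '] [a, b, c] = a ++ [' '] ++ b ++ [' '] ++ c := by
  simp [PySem.Chars.join, List.intercalate, List.intersperse]

-- every indicator phrase is nonempty
theorem pvAltInds_ne_nil : ∀ i ∈ pvAltInds, i ≠ [] := by decide

-- the first-char-dispatched sweep equals the per-indicator substring tests
theorem pvAltScan_eq_any_isIn :
    ∀ t : List Char, pvAltScan t = pvAltInds.any (fun ind => PySem.Chars.isIn ind t) := by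
  intro t
  induction t with
  | nil =>
      simp only [pvAltScan]
      symm
      rw [List.any_eq_false]
      intro ind hind hin
      have hinf := (PySem.Chars.isIn_iff_infix ind []).mp hin
      exact pvAltInds_ne_nil ind hind (List.eq_nil_of_infix_nil hinf)
  | cons c rest ih =>
      simp only [pvAltScan, pvAltByFirst_getD, List.any_filter]
      have hgrp : (pvAltInds.any fun ind =>
          (ind.headD ' ' == c) && PySem.Chars.startswith (c :: rest) ind) =
          pvAltInds.any (fun ind => PySem.Chars.startswith (c :: rest) ind) := by
        rw [Bool.eq_iff_iff, List.any_eq_true, List.any_eq_true]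
        constructor
        · rintro ⟨ind, hind, h⟩
          exact ⟨ind, hind, (Bool.and_eq_true _ _ |>.mp h).2⟩
        · rintro ⟨ind, hind, h⟩
          refine ⟨ind, hind, ?_⟩
          obtain ⟨d, tl, rfl⟩ := List.exists_cons_of_ne_nil (pvAltInds_ne_nil ind hind)
          have := (List.cons_prefix_cons.mp ((PySem.Chars.startswith_iff _ _).mp h)).1
          subst this
          simp [h]
      rw [hgrp]
      cases hb : pvAltInds.any (fun ind => PySem.Chars.startswith (c :: rest) ind) with
      | true =>
          simp only [if_true]
          symm
          rw [List.any_eq_true] at hb ⊢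
          obtain ⟨ind, hind, hp⟩ := hb
          refine ⟨ind, hind, ?_⟩
          rw [PySem.Chars.isIn_iff_infix]
          exact ((PySem.Chars.startswith_iff _ _).mp hp).isInfix
      | false =>
          simp only [Bool.false_eq_true, if_false]
          rw [ih, Bool.eq_iff_iff]
          rw [List.any_eq_false] at hb
          simp only [List.any_eq_true, PySem.Chars.isIn_iff_infix, List.infix_cons_iff]
          constructor
          · rintro ⟨ind, hind, hinf⟩
            exact ⟨ind, hind, Or.inr hinf⟩
          · rintro ⟨ind, hind, hp | hinf⟩
            · exact absurd ((PySem.Chars.startswith_iff (c :: rest) ind).mpr hp)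
                (by simpa using hb ind hind)
            · exact ⟨ind, hind, hinf⟩

-- ===== VERDICT =====
theorem is_press_release_py_spec : Claim_equal_is_press_release_py := by
  intro article_data _
  unfold Spec_is_press_release_py is_press_release_py is_press_release_py_alt
  rw [pvJoin3, pvAltScan_eq_any_isIn]
  simp [pvAltInds]
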